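-- pv_equiv track=rewrite | github.com/saraitne11/CodingTest | SamsungSWExpert/SamsungProblem4014/problem4014.py | check
-- ===== SOURCE A (Python) =====
-- def check(line, x):
--     i = 1
--     n = len(line)
--     temp = line[:]                  # 원본 복사
--     slope = [0 for _ in temp]
--     while i < n:
--         if temp[i] == temp[i-1]:    # 현재랑 이전이랑 높이 같은 경우
--             i += 1
--         else:
--             dif = temp[i] - temp[i-1]
--             if abs(dif) > 1:    # 높이 차이가 2 이상 일 경우 활주로 건설 불가
--                 return 0
--             elif dif == 1:      # 현재가 이전보다 1 높을 경우
--                 if i < x:       # 이전 블럭들이 경사로보다 짧음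
--                     return 0
--                 else:
--                     height = temp[i-1]
--                     for j in range(i-x, i-1):                       # temp[i-1] 값이 x만큼 연속 되는지?
--                         if temp[j] != height or slope[j] == 1:      # 이미 경사로 설치 됐는지?
--                             return 0
--                     slope[i-x:i] = [1 for _ in range(x)]        # 경사로 설치했으면 표시
--                     i += 1
--             elif dif == -1:     # 현재가 이전보다 1 낮을 경우
--                 if i+x > n:     # 남은 블럭들이 경사로 보다 짧음
--                     return 0
--                 else:
--                     height = temp[i]
--                     for j in range(i+1, i+x):
--                         if temp[j] != height:
--                             return 0
--                     slope[i:i+x] = [1 for _ in range(x)]        # 경사로 설치했으면 표시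
--                     i = i + x
--     return 1
-- ===== SOURCE B (Python) =====
-- def check(line, x):
--     # Single pass with an O(1) "available flat cells" budget, no slope array:
--     # rem = cells of the current run still usable for a ramp (negative while a
--     # descending ramp laid at the run's front is not yet fully covered).
--     if not line:
--         return 1
--     prev = line[0]
--     rem = 1
--     for h in line[1:]:
--         d = h - prev
--         if d == 0:
--             rem += 1
--         elif d == 1:
--             if rem < x:        # ascending ramp needs x free cells behind
--                 return 0
--             rem = 1
--         elif d == -1:
--             if rem < 0:        # previous descending ramp was not covered
--                 return 0
--             rem = 1 - x        # descending ramp consumes x cells ahead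
--         else:
--             return 0
--         prev = h
--     return 1 if rem >= 0 else 0
-- ===== Notes on version B (the rewrite author's own statement) =====
-- stated objective: simpler
-- what changed: Replaced the index/while loop with a slope-marking array, window re-scans and slice assignments by a single left-to-right pass that keeps only an O(1) integer budget of usable flat cells per run (negative while a descending ramp is being covered).
-- intended difference: When x == 1 and all adjacent height differences are at most 1 but some cell is a width-1 valley (both neighbours one higher), A returns 1 because its slope-reuse window range(i-x, i-1) is empty for x=1 and never notices that the single valley cell must carry both ramps, while B returns 0, the intended answer since one cell cannot host a descending and an ascending ramp at once. — e.g. on check([2, 1, 2], 1): A returns 1, B returns 0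
-- outside the precondition, e.g. on check([2, 1], 0): A does not finish within the time limit, B returns 1; on check([1, 2], 0): A returns 1, B returns 1
import Mathlib
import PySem

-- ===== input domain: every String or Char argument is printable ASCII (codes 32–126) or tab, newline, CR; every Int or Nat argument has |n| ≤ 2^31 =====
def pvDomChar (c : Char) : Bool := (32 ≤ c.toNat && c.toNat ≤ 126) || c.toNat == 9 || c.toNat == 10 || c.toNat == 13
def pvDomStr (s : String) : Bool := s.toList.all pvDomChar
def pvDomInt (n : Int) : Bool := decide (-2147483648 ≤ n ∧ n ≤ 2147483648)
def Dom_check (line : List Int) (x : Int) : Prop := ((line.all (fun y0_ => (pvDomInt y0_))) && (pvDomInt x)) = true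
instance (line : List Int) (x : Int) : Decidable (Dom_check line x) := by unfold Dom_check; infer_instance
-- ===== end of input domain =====

-- B replaces A's slope-marking array, window re-scans and slice assignments by a
-- single pass keeping an O(1) per-run budget of usable flat cells (objective: simpler).

-- ===== PORT A =====
-- While loop of A: state (i, slope); fuel only bounds the recursion (under Pre_check
-- the index i strictly increases, so fuel `line.length + 1` is never exhausted).
-- All list reads use pyGetD: under Pre_check every index A reads is in range.
def loopA (temp : List Int) (x : Int) (n : Int) : Nat → Int → List Int → Int
  | 0, _, _ => 1
  | fuel + 1, i, slope =>
    if i < n then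
      if PySem.List.pyGetD temp i 0 = PySem.List.pyGetD temp (i - 1) 0 then
        loopA temp x n fuel (i + 1) slope
      else
        let dif := PySem.List.pyGetD temp i 0 - PySem.List.pyGetD temp (i - 1) 0
        if 1 < dif.natAbs then 0
        else if dif = 1 then
          if i < x then 0
          else
            let height := PySem.List.pyGetD temp (i - 1) 0
            if (PySem.List.pyRange (i - x) (i - 1) 1).any
                (fun j => decide (PySem.List.pyGetD temp j 0 ≠ height) ||
                          decide (PySem.List.pyGetD slope j 0 = 1)) then 0
            else
              loopA temp x n fuel (i + 1)
                (PySem.List.slice slope none (some (i - x)) ++ List.replicate x.toNat 1 ++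
                 PySem.List.slice slope (some i) none)
        else if dif = -1 then
          if n < i + x then 0
          else
            let height := PySem.List.pyGetD temp i 0
            if (PySem.List.pyRange (i + 1) (i + x) 1).any
                (fun j => decide (PySem.List.pyGetD temp j 0 ≠ height)) then 0
            else
              loopA temp x n fuel (i + x)
                (PySem.List.slice slope none (some i) ++ List.replicate x.toNat 1 ++
                 PySem.List.slice slope (some (i + x)) none)
        else loopA temp x n fuel i slope   -- unreachable: dif ∈ {1,-1} here (Python would re-loop)
    else 1

def check (line : List Int) (x : Int) : Int :=
  loopA line x (line.length : Int) (line.length + 1) 1 (line.map (fun _ => 0))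

-- ===== PORT B =====
def goB (x : Int) : List Int → Int → Int → Int
  | [], _, rem => if 0 ≤ rem then 1 else 0
  | h :: t, prev, rem =>
    if h - prev = 0 then goB x t h (rem + 1)
    else if h - prev = 1 then (if rem < x then 0 else goB x t h 1)
    else if h - prev = -1 then (if rem < 0 then 0 else goB x t h (1 - x))
    else 0

def check_alt (line : List Int) (x : Int) : Int :=
  match line with
  | [] => 1
  | h :: t => goB x t h 1

-- ===== PRECONDITION & SPEC =====
-- Pre_ excludes x ≤ 0, which is not a valid ramp length: there A loops forever as soon
-- as the line contains a descent (i = i + x no longer advances), and its value on the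
-- remaining degenerate inputs is accidental.
def Pre_check (line : List Int) (x : Int) : Prop := 1 ≤ x
instance (line : List Int) (x : Int) : Decidable (Pre_check line x) := by
  unfold Pre_check; infer_instance
def pvWitness_check : List Int × Int := ([2, 1, 1, 2], 2)

-- When x = 1 and all adjacent height differences are ≤ 1 but some cell is a width-1
-- valley (both neighbours one higher), A returns 1 — its reuse window range(i-x, i-1)
-- is empty for x = 1, so it never notices the valley cell must carry both ramps —
-- while B returns 0, the intended answer: one cell cannot host two ramps.
def D_check (line : List Int) (x : Int) : Prop :=
  x = 1 ∧ List.IsChain (fun a b => (b - a).natAbs ≤ 1) line ∧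
  ∃ i < line.length - 2, line.getD i 0 = line.getD (i + 1) 0 + 1 ∧
    line.getD (i + 2) 0 = line.getD (i + 1) 0 + 1
instance (line : List Int) (x : Int) : Decidable (D_check line x) := by
  unfold D_check; infer_instance

def Spec_check (line : List Int) (x : Int) (out : Int) : Prop :=
  ¬ D_check line x → out = check_alt line x
instance (line : List Int) (x : Int) (out : Int) : Decidable (Spec_check line x out) := by
  unfold Spec_check; infer_instance

def pvDiffWitness_check : List Int × Int := ([2, 1, 2], 1)
def pvDiffWitnessOut_check : Int × Int := (1, 0)

-- ===== CLAIM (what is proved, stated in full; the proofs are below) =====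
def Claim_unchanged_check : Prop :=
  ∀ (line : List Int) (x : Int), Dom_check line x → Pre_check line x →
    Spec_check line x (check line x)
def Claim_changed_check : Prop :=
  Dom_check (pvDiffWitness_check.1) (pvDiffWitness_check.2) ∧
  Pre_check (pvDiffWitness_check.1) (pvDiffWitness_check.2) ∧
  D_check (pvDiffWitness_check.1) (pvDiffWitness_check.2) ∧
  check (pvDiffWitness_check.1) (pvDiffWitness_check.2) = pvDiffWitnessOut_check.1 ∧
  check_alt (pvDiffWitness_check.1) (pvDiffWitness_check.2) = pvDiffWitnessOut_check.2 ∧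
  pvDiffWitnessOut_check.1 ≠ pvDiffWitnessOut_check.2
def Claim_exact_check : Prop :=
  ∀ (line : List Int) (x : Int), Dom_check line x → Pre_check line x → D_check line x →
    check line x ≠ check_alt line x

-- ===== LEMMAS AND PROOFS =====

-- adjacent-difference reading of the Chain' in D_check.
theorem isChain_getD (l : List Int) :
    List.IsChain (fun a b => (b - a).natAbs ≤ 1) l ↔
      ∀ j, j + 1 < l.length → (l.getD (j + 1) 0 - l.getD j 0).natAbs ≤ 1 := by
  rw [List.isChain_iff_getElem]
  constructor
  · intro H j hj
    rw [List.getD_eq_getElem l 0 (by omega), List.getD_eq_getElem l 0 (by omega)]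
    exact H j hj
  · intro H j hj
    have := H j hj
    rwa [List.getD_eq_getElem l 0 (by omega), List.getD_eq_getElem l 0 (by omega)] at this

-- B steps through k equal cells by adding k to the budget.
theorem goB_replicate (x h : Int) (k : Nat) :
    ∀ (t : List Int) (rem : Int),
      goB x (List.replicate k h ++ t) h rem = goB x t h (rem + k) := by
  induction k with
  | zero => intro t rem; simp
  | succ k ih =>
    intro t rem
    rw [List.replicate_succ, List.cons_append]
    show (if h - h = 0 then goB x (List.replicate k h ++ t) h (rem + 1) else _) = _
    rw [if_pos (sub_self h), ih]
    congr 1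
    push_cast
    ring

-- a flat segment of the line is a replicate block of the drop.
theorem drop_eq_replicate (l : List Int) (h : Int) :
    ∀ (k i : Nat), i + k ≤ l.length → (∀ j, i ≤ j → j < i + k → l.getD j 0 = h) →
      l.drop i = List.replicate k h ++ l.drop (i + k) := by
  intro k
  induction k with
  | zero => intro i _ _; simp
  | succ k ih =>
    intro i hlen hflat
    have hi : i < l.length := by omega
    rw [List.drop_eq_getElem_cons hi, List.replicate_succ, List.cons_append]
    have hv : l[i] = h := by
      have := hflat i (le_refl i) (by omega)
      rwa [List.getD_eq_getElem l 0 hi] at this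
    rw [hv]
    have h2 : i + 1 + k = i + (k + 1) := by omega
    have := ih (i + 1) (by omega) (fun j hj1 hj2 => hflat j (by omega) (by omega))
    rw [h2] at this
    rw [this]

-- B returns 0 when the whole remaining list is flat but the budget ends negative.
theorem goB_dead_end (x : Int) :
    ∀ (t : List Int) (prev rem : Int),
      (∀ j, j < t.length → t.getD j 0 = prev) → rem + t.length < 0 →
      goB x t prev rem = 0 := by
  intro t
  induction t with
  | nil =>
    intro prev rem _ hneg
    simp only [goB]
    rw [if_neg (by simp at hneg; omega)]
  | cons a t ih =>
    intro prev rem hflat hneg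
    have ha : a = prev := hflat 0 (by simp) 
    subst ha
    show (if a - a = 0 then goB x t a (rem + 1) else _) = 0
    rw [if_pos (sub_self a)]
    exact ih a (rem + 1) (fun j hj => hflat (j + 1) (by simpa using hj))
      (by simp at hneg ⊢; omega)

-- B returns 0 when the budget is still negative at the first height change.
theorem goB_dead_hit (x : Int) (hx : 1 ≤ x) :
    ∀ (m : Nat) (t : List Int) (prev rem : Int),
      (∀ j, j < m → t.getD j 0 = prev) → m < t.length → t.getD m 0 ≠ prev →
      rem + m < 0 → goB x t prev rem = 0 := by
  intro m
  induction m with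
  | zero =>
    intro t prev rem _ hlt hne hneg
    rcases t with _ | ⟨a, t'⟩
    · simp at hlt
    simp only [List.getD_cons_zero] at hne
    show (if a - prev = 0 then _ else _) = 0
    rw [if_neg (by omega)]
    simp only [Nat.cast_zero, add_zero] at hneg
    split_ifs <;> omega
  | succ m ih =>
    intro t prev rem hflat hlt hne hneg
    rcases t with _ | ⟨a, t'⟩
    · simp at hlt
    have ha : a = prev := hflat 0 (by omega)
    subst ha
    show (if a - a = 0 then goB x t' a (rem + 1) else _) = 0
    rw [if_pos (sub_self a)]
    exact ih t' a (rem + 1) (fun j hj => hflat (j + 1) (by omega)) (by simpa using hlt)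
      (by simpa using hne) (by push_cast at hneg ⊢; omega)

-- with x = 1 a width-1 valley always kills B.
theorem goB_valley (a : Int) :
    ∀ (u : List Int) (prev : Int) (t : List Int) (rem : Int) (v : List Int),
      prev :: t = u ++ (a + 1) :: a :: (a + 1) :: v → goB 1 t prev rem = 0 := by
  intro u
  induction u with
  | nil =>
    intro prev t rem v h
    simp only [List.nil_append, List.cons.injEq] at h
    obtain ⟨rfl, rfl⟩ := h
    show (if a - (a + 1) = 0 then _ else _) = 0
    rw [if_neg (by omega), if_neg (by omega), if_pos (by omega)]
    split_ifs with h1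
    · rfl
    · show (if a + 1 - a = 0 then _ else _) = 0
      rw [if_neg (by omega), if_pos (by omega), if_pos (by omega)]
  | cons p u' ih =>
    intro prev t rem v h
    simp only [List.cons_append, List.cons.injEq] at h
    obtain ⟨rfl, ht⟩ := h
    obtain ⟨b, t'', rfl⟩ : ∃ b t'', t = b :: t'' := by
      rcases t with _ | ⟨b, t''⟩
      · exact absurd ht (by simp)
      · exact ⟨b, t'', rfl⟩
    show (if b - prev = 0 then _ else _) = 0
    split_ifs <;> first | rfl | exact ih b t'' _ v ht

-- A returns 0 whenever a height jump > 1 lies at or after the current position.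
theorem loopA_jump (line : List Int) (x : Int) (hx : 1 ≤ x) :
    ∀ (fuel : Nat) (i : Nat) (slope : List Int), 1 ≤ i → line.length ≤ i + fuel →
      (∃ j, i ≤ j ∧ j < line.length ∧ 1 < (line.getD j 0 - line.getD (j - 1) 0).natAbs) →
      loopA line x (line.length : Int) fuel (i : Nat) slope = 0 := by
  intro fuel
  induction fuel with
  | zero =>
    intro i slope h1 h2 hj
    obtain ⟨j, hij, hjl, _⟩ := hj
    omega
  | succ fuel ih =>
    intro i slope h1 h2 hj
    obtain ⟨j, hij, hjl, hjump⟩ := hj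
    have hin : i < line.length := by omega
    have e1 : (i : Int) - 1 = ((i - 1 : Nat) : Int) := by omega
    have e2 : (i : Int) + 1 = ((i + 1 : Nat) : Int) := by push_cast; ring
    have e3 : (i : Int) + x = ((i + x.toNat : Nat) : Int) := by omega
    simp only [loopA, e1, e2, e3, PySem.List.pyGetD_natCast]
    rw [if_pos (show ((i : Nat) : Int) < (line.length : Int) by exact_mod_cast hin)]
    by_cases heq : line.getD i 0 = line.getD (i - 1) 0
    · rw [if_pos heq]
      have hji : j ≠ i := by intro h; subst h; rw [heq] at hjump; simp at hjump
      exact ih (i + 1) slope (by omega) (by omega) ⟨j, by omega, hjl, hjump⟩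
    · rw [if_neg heq]
      by_cases hbig : 1 < (line.getD i 0 - line.getD (i - 1) 0).natAbs
      · rw [if_pos hbig]
      · rw [if_neg hbig]
        have hji : j ≠ i := by intro h; subst h; omega
        by_cases hd1 : line.getD i 0 - line.getD (i - 1) 0 = 1
        · rw [if_pos hd1]
          by_cases hix : ((i : Nat) : Int) < x
          · rw [if_pos hix]
          · rw [if_neg hix]
            split
            · rfl
            · exact ih (i + 1) _ (by omega) (by omega) ⟨j, by omega, hjl, hjump⟩
        · rw [if_neg hd1]
          by_cases hd2 : line.getD i 0 - line.getD (i - 1) 0 = -1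
          · rw [if_pos hd2]
            by_cases hnx : (line.length : Int) < ((i + x.toNat : Nat) : Int)
            · rw [if_pos hnx]
            · rw [if_neg hnx]
              by_cases hany : ((PySem.List.pyRange (((i + 1 : Nat) : Int)) (((i + x.toNat : Nat) : Int)) 1).any
                  (fun j => decide (PySem.List.pyGetD line j 0 ≠ line.getD i 0))) = true
              · rw [if_pos hany]
              · rw [if_neg hany]
                have hflat : ∀ k : Nat, i < k → k < i + x.toNat → line.getD k 0 = line.getD i 0 := by
                  intro k hk1 hk2
                  by_contra hne
                  apply hany
                  rw [List.any_eq_true]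
                  refine ⟨(k : Int), ?_, by simp only [PySem.List.pyGetD_natCast, decide_eq_true_eq]; exact hne⟩
                  rw [PySem.List.mem_pyRange_one]
                  constructor <;> [exact_mod_cast hk1; exact_mod_cast hk2]
                have hjge : i + x.toNat ≤ j := by
                  by_contra hlt
                  rcases Nat.lt_or_ge i j with hgt | hle
                  · have h5 : line.getD j 0 = line.getD i 0 := hflat j hgt (by omega)
                    have h6 : line.getD (j - 1) 0 = line.getD i 0 := by
                      rcases Nat.eq_or_lt_of_le hgt with he | hlt2
                      · have : j - 1 = i := by omega
                        rw [this]
                      · exact hflat (j - 1) (by omega) (by omega)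
                    rw [h5, h6] at hjump
                    simp at hjump
                  · have : j = i := by omega
                    subst this
                    omega
                exact ih (i + x.toNat) _ (by omega) (by omega) ⟨j, hjge, hjl, hjump⟩
          · rw [if_neg hd2]
            exact ih i slope h1 (by omega) ⟨j, hij, hjl, hjump⟩

-- with x = 1 and no height jump > 1, A always returns 1.
theorem loopA_one (line : List Int) :
    ∀ (fuel : Nat) (i : Nat) (slope : List Int), 1 ≤ i → i ≤ line.length →
      line.length ≤ i + fuel →
      (∀ j, j < line.length → 1 ≤ j → (line.getD j 0 - line.getD (j - 1) 0).natAbs ≤ 1) →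
      loopA line 1 (line.length : Int) fuel (i : Nat) slope = 1 := by
  intro fuel
  induction fuel with
  | zero => intro i slope _ _ _ _; simp [loopA]
  | succ fuel ih =>
    intro i slope h1 h2 h3 hsm
    by_cases hin : i < line.length
    · have e1 : (i : Int) - 1 = ((i - 1 : Nat) : Int) := by omega
      have e2 : (i : Int) + 1 = ((i + 1 : Nat) : Int) := by push_cast; ring
      simp only [loopA, e1, e2, PySem.List.pyGetD_natCast]
      rw [if_pos (show ((i : Nat) : Int) < (line.length : Int) by exact_mod_cast hin)]
      by_cases heq : line.getD i 0 = line.getD (i - 1) 0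
      · rw [if_pos heq]
        exact ih (i + 1) slope (by omega) (by omega) (by omega) hsm
      · rw [if_neg heq]
        have hd : (line.getD i 0 - line.getD (i - 1) 0).natAbs ≤ 1 := hsm i hin h1
        rw [if_neg (by omega)]
        by_cases hd1 : line.getD i 0 - line.getD (i - 1) 0 = 1
        · rw [if_pos hd1, if_neg (show ¬ ((i : Nat) : Int) < 1 by exact_mod_cast Nat.not_lt.2 h1)]
          rw [PySem.List.pyRange_one_eq_nil (le_refl (((i - 1 : Nat) : Int)))]
          simp only [List.any_nil, Bool.false_eq_true, if_false]
          exact ih (i + 1) _ (by omega) (by omega) (by omega) hsm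
        · have hd2 : line.getD i 0 - line.getD (i - 1) 0 = -1 := by omega
          rw [if_neg hd1, if_pos hd2]
          rw [if_neg (show ¬ (line.length : Int) < ((i + 1 : Nat) : Int) by exact_mod_cast Nat.not_lt.2 (by omega))]
          rw [PySem.List.pyRange_one_eq_nil (le_refl (((i + 1 : Nat) : Int)))]
          simp only [List.any_nil, Bool.false_eq_true, if_false]
          exact ih (i + 1) _ (by omega) (by omega) (by omega) hsm
    · simp only [loopA]
      rw [if_neg (show ¬ ((i : Nat) : Int) < (line.length : Int) by exact_mod_cast hin)]

-- value map of the slice assignment slope[a:b] = [1]*k.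
theorem setSlice_getD (l : List Int) (a k b : Nat) (hab : a + k = b) (ha : a ≤ l.length)
    (j : Nat) :
    (l.take a ++ List.replicate k (1 : Int) ++ l.drop b).getD j 0 =
      if j < a then l.getD j 0 else if j < b then 1 else l.getD j 0 := by
  have hta : (l.take a).length = a := by simp [ha]
  by_cases h1 : j < a
  · rw [if_pos h1, List.append_assoc, List.getD_append _ _ _ j (by omega)]
    rcases Nat.lt_or_ge j l.length with h2 | h2
    · rw [List.getD_eq_getElem _ 0 (by simpa [hta] using h1), List.getD_eq_getElem _ 0 (by omega)]
      simp
    · omega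
  · rw [if_neg h1, List.append_assoc, List.getD_append_right _ _ _ j (by omega)]
    by_cases h2 : j < b
    · rw [List.getD_append _ _ _ _ (by simp; omega)]
      rw [List.getD_eq_getElem _ 0 (by simp; omega), if_pos h2]
      simp
    · rw [if_neg h2, List.getD_append_right _ _ _ _ (by simp; omega)]
      simp only [hta, List.length_replicate]
      rcases Nat.lt_or_ge j l.length with h3 | h3
      · rw [List.getD_eq_getElem _ 0 (by simp; omega), List.getD_eq_getElem _ 0 h3]
        simp only [List.getElem_drop]
        congr 1
        omega
      · rw [List.getD_eq_default _ 0 (by simp; omega), List.getD_eq_default _ 0 (by omega)]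

-- length is preserved by the slice assignment.
theorem setSlice_length (l : List Int) (a k b : Nat) (hab : a + k = b) (hb : b ≤ l.length) :
    (l.take a ++ List.replicate k (1 : Int) ++ l.drop b).length = l.length := by
  simp
  omega

-- the main simulation invariant: at A's loop head at cell i, with s the start of the
-- maximal run containing cell i-1, A's future equals B's future with budget rem.
theorem loopA_eq_goB (line : List Int) (x : Int) (hx : 1 ≤ x)
    (hD : ¬ D_check line x) :
    ∀ (fuel : Nat) (i s : Nat) (slope : List Int) (rem : Int),
      line.length ≤ i + fuel → 1 ≤ i → i ≤ line.length → s < i →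
      slope.length = line.length →
      (∀ j, s ≤ j → j < i → line.getD j 0 = line.getD (i - 1) 0) →
      (s = 0 ∨ line.getD (s - 1) 0 ≠ line.getD s 0) →
      (∀ j, 1 ≤ j → j < i → (line.getD j 0 - line.getD (j - 1) 0).natAbs ≤ 1) →
      (((∀ j, s ≤ j → slope.getD j 0 = 0) ∧ rem = (i : Int) - s) ∨
        (s + x.toNat ≤ i ∧ 1 ≤ s ∧ line.getD (s - 1) 0 = line.getD s 0 + 1 ∧
          (∀ j, s ≤ j → j < s + x.toNat → slope.getD j 0 = 1) ∧
          (∀ j, s + x.toNat ≤ j → slope.getD j 0 = 0) ∧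
          rem = (i : Int) - s - x)) →
      loopA line x (line.length : Int) fuel (i : Nat) slope =
        goB x (line.drop i) (line.getD (i - 1) 0) rem := by
  intro fuel
  induction fuel with
  | zero =>
    intro i s slope rem hfuel h1 h2 hsi hslen hflat hmax hsm hmarks
    have hi : i = line.length := by omega
    subst hi
    have hrem : 0 ≤ rem := by
      rcases hmarks with ⟨_, hr⟩ | ⟨hb, _, _, _, _, hr⟩ <;> omega
    rw [List.drop_eq_nil_of_le (le_refl _)]
    show (1 : Int) = if 0 ≤ rem then 1 else 0
    rw [if_pos hrem]
  | succ fuel ih =>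
    intro i s slope rem hfuel h1 h2 hsi hslen hflat hmax hsm hmarks
    have hrem : 0 ≤ rem := by
      rcases hmarks with ⟨_, hr⟩ | ⟨hb, _, _, _, _, hr⟩ <;> omega
    by_cases hin : i < line.length
    case neg =>
      have hi : i = line.length := by omega
      subst hi
      simp only [loopA]
      rw [if_neg (by omega), List.drop_eq_nil_of_le (le_refl _)]
      show (1 : Int) = if 0 ≤ rem then 1 else 0
      rw [if_pos hrem]
    case pos =>
    have e1 : (i : Int) - 1 = ((i - 1 : Nat) : Int) := by omega
    have e2 : (i : Int) + 1 = ((i + 1 : Nat) : Int) := by push_cast; ring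
    have e3 : (i : Int) + x = ((i + x.toNat : Nat) : Int) := by omega
    simp only [loopA, e1, e2, e3, PySem.List.pyGetD_natCast]
    rw [if_pos (show ((i : Nat) : Int) < (line.length : Int) by exact_mod_cast hin)]
    rw [List.drop_eq_getElem_cons hin, ← List.getD_eq_getElem line 0 hin]
    show _ = (if line.getD i 0 - line.getD (i - 1) 0 = 0 then _ else _)
    by_cases heq : line.getD i 0 = line.getD (i - 1) 0
    · rw [if_pos heq, if_pos (by omega)]
      have := ih (i + 1) s slope (rem + 1) (by omega) (by omega) (by omega) (by omega) hslen
        (fun j hj1 hj2 => by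
          rw [Nat.add_sub_cancel]
          rcases Nat.lt_or_ge j i with hj | hj
          · rw [hflat j hj1 hj, ← heq]
          · have : j = i := by omega
            subst this
            rfl)
        hmax
        (fun j hj1 hj2 => by
          rcases Nat.lt_or_ge j i with hj | hj
          · exact hsm j hj1 hj
          · have : j = i := by omega
            subst this
            rw [heq]
            simp)
        (by
          rcases hmarks with ⟨hz, hr⟩ | ⟨hb0, hb1, hb2, hm1, hm0, hr⟩
          · exact Or.inl ⟨hz, by push_cast; omega⟩
          · exact Or.inr ⟨by omega, hb1, hb2, hm1, hm0, by push_cast; omega⟩)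
      rw [Nat.add_sub_cancel] at this
      rw [this]
    · rw [if_neg (show ¬(line.getD i 0 - line.getD (i - 1) 0 = 0) by omega), if_neg heq]
      by_cases hbig : 1 < (line.getD i 0 - line.getD (i - 1) 0).natAbs
      · rw [if_pos hbig,
          if_neg (show ¬(line.getD i 0 - line.getD (i - 1) 0 = 1) by omega),
          if_neg (show ¬(line.getD i 0 - line.getD (i - 1) 0 = -1) by omega)]
      · rw [if_neg hbig]
        by_cases hd1 : line.getD i 0 - line.getD (i - 1) 0 = 1
        -- ===== ascent =====
        · rw [if_pos hd1, if_pos hd1]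
          by_cases hix : ((i : Nat) : Int) < x
          · rw [if_pos hix, if_pos (show rem < x by
              rcases hmarks with ⟨_, hr⟩ | ⟨hb, _, _, _, _, hr⟩ <;> push_cast at hix ⊢ <;> omega)]
          · rw [if_neg hix]
            by_cases hremx : rem < x
            · rw [if_pos hremx]
              by_cases hx1 : x = 1
              · -- empty window: A cannot see the conflict; use ¬D to find a jump ahead
                subst hx1
                rw [PySem.List.pyRange_one_eq_nil (by omega)]
                simp only [List.any_nil, Bool.false_eq_true, if_false]
                have hrem0 : rem = 0 := by
                  rcases hmarks with ⟨_, hr⟩ | ⟨hb, _, _, _, _, hr⟩ <;> omega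
                rcases hmarks with ⟨_, hr⟩ | ⟨hb0, hb1, hb2, hm1, hm0, hr⟩
                · omega
                · have hieq : i = s + 1 := by omega
                  have hv2 : line.getD (s + 1) 0 = line.getD s 0 + 1 := by
                    have h5 : line.getD s 0 = line.getD (i - 1) 0 := hflat s (le_refl s) hsi
                    have : line.getD (s + 1) 0 = line.getD i 0 := by rw [← hieq]
                    omega
                  have hnotch : ¬ List.IsChain (fun a b => (b - a).natAbs ≤ 1) line := by
                    intro hch
                    refine hD ⟨rfl, hch, s - 1, by omega, ?_, ?_⟩
                    · rw [show s - 1 + 1 = s by omega]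
                      exact hb2
                    · rw [show s - 1 + 1 = s by omega, show s - 1 + 2 = s + 1 by omega]
                      exact hv2
                  rw [isChain_getD] at hnotch
                  push_neg at hnotch
                  obtain ⟨j0, hj0lt, hjump0⟩ := hnotch
                  have hj1 : j0 + 1 < line.length := hj0lt
                  have hjump : 1 < (line.getD (j0 + 1) 0 - line.getD (j0 + 1 - 1) 0).natAbs := by
                    rw [Nat.add_sub_cancel]
                    omega
                  have hji : i + 1 ≤ j0 + 1 := by
                    rcases Nat.lt_or_ge (j0 + 1) i with hj | hj
                    · exact absurd (hsm (j0 + 1) (by omega) hj) (by omega)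
                    · rcases Nat.eq_or_lt_of_le hj with he | hlt
                      · exfalso
                        rw [← he] at hjump
                        omega
                      · omega
                  exact loopA_jump line 1 (le_refl 1) fuel (i + 1) _ (by omega) (by omega)
                    ⟨j0 + 1, hji, hj1, hjump⟩
              · -- x ≥ 2: the window detects the conflict
                have hx2 : 2 ≤ x := by omega
                have hany : ((PySem.List.pyRange (((i : Nat) : Int) - x) (((i - 1 : Nat) : Int)) 1).any
                    (fun j => decide (PySem.List.pyGetD line j 0 ≠ line.getD (i - 1) 0) ||
                              decide (PySem.List.pyGetD slope j 0 = 1))) = true := by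
                  rw [List.any_eq_true]
                  rcases hmarks with ⟨hz, hr⟩ | ⟨hb0, hb1, hb2, hm1, hm0, hr⟩
                  · -- no marks: the window sticks out left of the run
                    have hs1 : 1 ≤ s := by
                      by_contra h
                      have : s = 0 := by omega
                      subst this
                      push_cast at hix
                      omega
                    refine ⟨((s - 1 : Nat) : Int), ?_, ?_⟩
                    · rw [PySem.List.mem_pyRange_one]
                      constructor <;> push_cast <;> omega
                    · simp only [PySem.List.pyGetD_natCast, Bool.or_eq_true, decide_eq_true_eq]
                      left
                      have h5 : line.getD s 0 = line.getD (i - 1) 0 := hflat s (le_refl s) hsi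
                      rcases hmax with h6 | h6
                      · omega
                      · rw [h5] at h6
                        exact h6
                  · -- marks at the front of the run: the window hits them
                    refine ⟨((i - x.toNat : Nat) : Int), ?_, ?_⟩
                    · rw [PySem.List.mem_pyRange_one]
                      constructor <;> push_cast <;> omega
                    · simp only [PySem.List.pyGetD_natCast, Bool.or_eq_true, decide_eq_true_eq]
                      right
                      exact hm1 (i - x.toNat) (by omega) (by omega)
                rw [if_pos hany]
            · -- budget suffices: the window is clean, both sides continue
              have hno : ¬ ((PySem.List.pyRange (((i : Nat) : Int) - x) (((i - 1 : Nat) : Int)) 1).any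
                  (fun j => decide (PySem.List.pyGetD line j 0 ≠ line.getD (i - 1) 0) ||
                            decide (PySem.List.pyGetD slope j 0 = 1))) = true := by
                rw [List.any_eq_true]
                rintro ⟨j, hjmem, hjf⟩
                rw [PySem.List.mem_pyRange_one] at hjmem
                have hsle : (s : Int) ≤ j := by
                  rcases hmarks with ⟨_, hr⟩ | ⟨hb0, _, _, _, _, hr⟩ <;> omega
                have hj0 : j = ((j.toNat : Nat) : Int) := by omega
                rw [hj0] at hjf
                simp only [PySem.List.pyGetD_natCast, Bool.or_eq_true, decide_eq_true_eq] at hjf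
                rcases hjf with hjf | hjf
                · exact hjf (hflat j.toNat (by omega) (by omega))
                · rcases hmarks with ⟨hz, hr⟩ | ⟨hb0, hb1, hb2, hm1, hm0, hr⟩
                  · rw [hz j.toNat (by omega)] at hjf
                    omega
                  · rw [hm0 j.toNat (by omega)] at hjf
                    omega
              rw [if_neg hno, if_neg hremx]
              have e4 : ((i : Nat) : Int) - x = ((i - x.toNat : Nat) : Int) := by omega
              rw [e4, PySem.List.slice_to_natCast, PySem.List.slice_from_natCast]
              have hlen' : (slope.take (i - x.toNat) ++ List.replicate x.toNat 1 ++
                  slope.drop i).length = slope.length :=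
                setSlice_length slope (i - x.toNat) x.toNat i (by omega) (by omega)
              have := ih (i + 1) i _ 1 (by omega) (by omega) (by omega) (by omega)
                (by rw [hlen', hslen])
                (fun j hj1 hj2 => by
                  have : j = i := by omega
                  subst this
                  rw [Nat.add_sub_cancel])
                (Or.inr (show line.getD (i - 1) 0 ≠ line.getD i 0 from fun h5 => heq h5.symm))
                (fun j hj1 hj2 => by
                  rcases Nat.lt_or_ge j i with hj | hj
                  · exact hsm j hj1 hj
                  · have : j = i := by omega
                    subst this
                    omega)
                (by
                  refine Or.inl ⟨?_, by push_cast; ring⟩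
                  intro j hj
                  rw [setSlice_getD slope (i - x.toNat) x.toNat i (by omega) (by omega) j]
                  rw [if_neg (by omega), if_neg (by omega)]
                  rcases hmarks with ⟨hz, hr⟩ | ⟨hb0, _, _, _, hm0, hr⟩
                  · exact hz j (by omega)
                  · exact hm0 j (by omega))
              rw [Nat.add_sub_cancel] at this
              rw [this]
        -- ===== descent =====
        · have hd2 : line.getD i 0 - line.getD (i - 1) 0 = -1 := by omega
          rw [if_neg hd1, if_neg (show ¬(line.getD i 0 - line.getD (i - 1) 0 = 1) from hd1),
            if_pos hd2, if_pos hd2, if_neg (show ¬ rem < 0 by omega)]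
          by_cases hnx : (line.length : Int) < ((i + x.toNat : Nat) : Int)
          · rw [if_pos hnx]
            -- A fails for lack of room; B runs out of cells with a negative budget
            by_cases hflat2 : ∀ m, m < (line.drop (i + 1)).length →
                (line.drop (i + 1)).getD m 0 = line.getD i 0
            · rw [goB_dead_end x (line.drop (i + 1)) (line.getD i 0) (1 - x) hflat2
                (by simp; push_cast at hnx ⊢; omega)]
            · push_neg at hflat2
              have hex : ∃ m, m < (line.drop (i + 1)).length ∧
                  (line.drop (i + 1)).getD m 0 ≠ line.getD i 0 := hflat2
              have hm0 := Nat.find_spec hex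
              rw [goB_dead_hit x hx (Nat.find hex) (line.drop (i + 1)) (line.getD i 0) (1 - x)
                (fun k hk => by
                  by_contra hne
                  exact absurd ⟨by omega, hne⟩ (Nat.find_min hex hk))
                hm0.1 hm0.2
                (by
                  have h5 : Nat.find hex < (line.drop (i + 1)).length := hm0.1
                  have h7 : (line.drop (i + 1)).length = line.length - (i + 1) :=
                    List.length_drop
                  omega)]
          · rw [if_neg hnx]
            by_cases hany : ((PySem.List.pyRange (((i + 1 : Nat) : Int)) (((i + x.toNat : Nat) : Int)) 1).any
                (fun j => decide (PySem.List.pyGetD line j 0 ≠ line.getD i 0))) = true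
            · rw [if_pos hany]
              -- A finds a height change inside the ramp; B dies on a negative budget there
              rw [List.any_eq_true] at hany
              obtain ⟨j, hjmem, hjf⟩ := hany
              rw [PySem.List.mem_pyRange_one] at hjmem
              have hj0 : j = ((j.toNat : Nat) : Int) := by omega
              rw [hj0] at hjf
              simp only [PySem.List.pyGetD_natCast, decide_eq_true_eq] at hjf
              have hw1 : j.toNat - (i + 1) < (line.drop (i + 1)).length := by
                simp
                push_cast at hjmem hnx
                omega
              have hw2 : (line.drop (i + 1)).getD (j.toNat - (i + 1)) 0 ≠ line.getD i 0 := by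
                rw [List.getD_eq_getElem _ 0 hw1]
                rw [List.getElem_drop]
                rw [← List.getD_eq_getElem _ 0 (by push_cast at hjmem hnx; omega)]
                have : i + 1 + (j.toNat - (i + 1)) = j.toNat := by push_cast at hjmem; omega
                rw [this]
                exact hjf
              have hex : ∃ m, m < (line.drop (i + 1)).length ∧
                  (line.drop (i + 1)).getD m 0 ≠ line.getD i 0 := ⟨_, hw1, hw2⟩
              have hm0 := Nat.find_spec hex
              rw [goB_dead_hit x hx (Nat.find hex) (line.drop (i + 1)) (line.getD i 0) (1 - x)
                (fun k hk => by
                  by_contra hne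
                  exact absurd ⟨by omega, hne⟩ (Nat.find_min hex hk))
                hm0.1 hm0.2
                (by
                  have h6 : Nat.find hex ≤ j.toNat - (i + 1) := Nat.find_min' hex ⟨hw1, hw2⟩
                  push_cast at hjmem hnx
                  omega)]
            · rw [if_neg hany]
              -- the whole ramp is flat: A jumps to i+x, B walks through it to budget 0
              have hflat3 : ∀ k : Nat, i < k → k < i + x.toNat →
                  line.getD k 0 = line.getD i 0 := by
                intro k hk1 hk2
                by_contra hne
                apply hany
                rw [List.any_eq_true]
                refine ⟨(k : Int), ?_, ?_⟩
                · rw [PySem.List.mem_pyRange_one]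
                  constructor <;> push_cast <;> omega
                · simp only [PySem.List.pyGetD_natCast, decide_eq_true_eq]
                  exact hne
              have hdrop : line.drop (i + 1) =
                  List.replicate (x.toNat - 1) (line.getD i 0) ++ line.drop (i + x.toNat) := by
                have h9 := drop_eq_replicate line (line.getD i 0) (x.toNat - 1) (i + 1)
                  (by push_cast at hnx; omega)
                  (fun j hj1 hj2 => hflat3 j (by omega) (by omega))
                have h10 : i + 1 + (x.toNat - 1) = i + x.toNat := by omega
                rwa [h10] at h9
              rw [hdrop, goB_replicate]
              have er : 1 - x + ((x.toNat - 1 : Nat) : Int) = 0 := by omega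
              rw [er]
              rw [PySem.List.slice_to_natCast, PySem.List.slice_from_natCast]
              have hlen' : (slope.take i ++ List.replicate x.toNat 1 ++
                  slope.drop (i + x.toNat)).length = slope.length :=
                setSlice_length slope i x.toNat (i + x.toNat) rfl (by push_cast at hnx; omega)
              have := ih (i + x.toNat) i _ 0 (by omega) (by omega) (by push_cast at hnx; omega)
                (by omega) (by rw [hlen', hslen])
                (fun j hj1 hj2 => by
                  have hlast : line.getD (i + x.toNat - 1) 0 = line.getD i 0 := by
                    rcases Nat.eq_or_lt_of_le (show i ≤ i + x.toNat - 1 by omega) with he | hlt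
                    · rw [← he]
                    · exact hflat3 (i + x.toNat - 1) hlt (by omega)
                  rcases Nat.eq_or_lt_of_le hj1 with he | hlt
                  · rw [← he, hlast]
                  · rw [hflat3 j hlt hj2, hlast])
                (Or.inr (show ¬line.getD (i - 1) 0 = line.getD i 0 from fun h5 => heq h5.symm))
                (fun j hj1 hj2 => by
                  rcases Nat.lt_or_ge j i with hj | hj
                  · exact hsm j hj1 hj
                  · rcases Nat.eq_or_lt_of_le hj with he | hlt
                    · subst he
                      omega
                    · have h7 : line.getD j 0 = line.getD i 0 := hflat3 j hlt hj2
                      have h8 : line.getD (j - 1) 0 = line.getD i 0 := by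
                        rcases Nat.eq_or_lt_of_le (show i ≤ j - 1 by omega) with he2 | hlt2
                        · rw [← he2]
                        · exact hflat3 (j - 1) hlt2 (by omega)
                      omega)
                (by
                  refine Or.inr ⟨le_refl _, by omega, by omega, ?_, ?_, by push_cast; omega⟩
                  · intro j hj1 hj2
                    rw [setSlice_getD slope i x.toNat (i + x.toNat) rfl (by omega) j]
                    rw [if_neg (by omega), if_pos (by omega)]
                  · intro j hj
                    rw [setSlice_getD slope i x.toNat (i + x.toNat) rfl (by omega) j]
                    rw [if_neg (by omega), if_neg (by omega)]
                    rcases hmarks with ⟨hz, hr⟩ | ⟨hb0, _, _, _, hm0', hr⟩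
                    · exact hz j (by omega)
                    · exact hm0' j (by omega))
              have hlast : line.getD (i + x.toNat - 1) 0 = line.getD i 0 := by
                rcases Nat.eq_or_lt_of_le (show i ≤ i + x.toNat - 1 by omega) with he | hlt
                · rw [← he]
                · exact hflat3 (i + x.toNat - 1) hlt (by omega)
              rw [hlast] at this
              rw [this]

-- a list splits around three consecutive cells.
theorem split3 (l : List Int) (j : Nat) (h1 : 1 ≤ j) (h2 : j + 1 < l.length) :
    l = l.take (j - 1) ++ l.getD (j - 1) 0 :: l.getD j 0 :: l.getD (j + 1) 0 ::
      l.drop (j + 2) := by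
  have e0 : j - 1 + 1 = j := by omega
  have d1 := List.drop_eq_getElem_cons (l := l) (show j - 1 < l.length by omega)
  have d2 := List.drop_eq_getElem_cons (l := l) (show j < l.length by omega)
  have d3 := List.drop_eq_getElem_cons (l := l) (show j + 1 < l.length from h2)
  rw [e0] at d1
  rw [← List.getD_eq_getElem l 0 (by omega)] at d1
  rw [← List.getD_eq_getElem l 0 (by omega)] at d2
  rw [← List.getD_eq_getElem l 0 h2] at d3
  conv_lhs => rw [← List.take_append_drop (j - 1) l]
  rw [d1, d2, d3]

-- ===== VERDICT =====
theorem check_spec : Claim_unchanged_check := by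
  unfold Claim_unchanged_check
  intro line x _hdom hx hD
  rcases line with _ | ⟨h, t⟩
  · simp [check, check_alt, loopA]
  · have hz : ∀ j : Nat, ((h :: t).map (fun _ => (0 : Int))).getD j 0 = 0 := by
      intro j
      rcases Nat.lt_or_ge j ((h :: t).map (fun _ => (0 : Int))).length with hj | hj
      · rw [List.getD_eq_getElem _ 0 hj]
        simp only [List.getElem_map]
      · rw [List.getD_eq_default _ 0 hj]
    have := loopA_eq_goB (h :: t) x hx hD ((h :: t).length + 1) 1 0
      ((h :: t).map (fun _ => 0)) 1 (by omega) (le_refl 1) (by simp) (by omega)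
      (by simp) (fun j hj1 hj2 => by rw [show j = 0 by omega])
      (Or.inl rfl) (fun j hj1 hj2 => by omega)
      (Or.inl ⟨fun j _ => hz j, by norm_num⟩)
    unfold check check_alt
    simpa using this

theorem check_changed : Claim_changed_check := by
  unfold Claim_changed_check; decide

theorem check_tight : Claim_exact_check := by
  unfold Claim_exact_check
  intro line x _hdom hx hD
  obtain ⟨hx1, hch, i, hilt, hv1, hv2⟩ := hD
  subst hx1
  have hlen3 : 3 ≤ line.length := by omega
  have hsm : ∀ j, j < line.length → 1 ≤ j →
      (line.getD j 0 - line.getD (j - 1) 0).natAbs ≤ 1 := by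
    intro j hjl hj1
    have := (isChain_getD line).1 hch (j - 1) (by omega)
    rwa [show j - 1 + 1 = j by omega] at this
  have hj2 : 1 ≤ i + 1 := by omega
  have hj3 : i + 1 + 1 < line.length := by omega
  have hA : check line 1 = 1 := by
    unfold check
    have := loopA_one line (line.length + 1) 1 (line.map (fun _ => 0)) (le_refl 1)
      (by omega) (by omega) hsm
    simpa using this
  have hB : check_alt line 1 = 0 := by
    have hsplit := split3 line (i + 1) hj2 hj3
    rw [show i + 1 - 1 = i by omega, show i + 1 + 1 = i + 2 from rfl] at hsplit
    rw [hv1, hv2] at hsplit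
    rcases line with _ | ⟨h, t⟩
    · simp at hlen3
    · show goB 1 t h 1 = 0
      exact goB_valley ((h :: t).getD (i + 1) 0) ((h :: t).take i) h t 1
        ((h :: t).drop (i + 1 + 2)) hsplit
  rw [hA, hB]
  exact one_ne_zero
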